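-- pv_equiv track=rewrite | github.com/Yorky0608/Chapter_10 | York_Chapter_10_Practical/Candies.py | arrange_by_candies
-- ===== SOURCE A (Python) =====
-- def arrange_by_candies(fav_candies):
--     candy_dict = {}
--     for name, candies in fav_candies.items():
--         for candy in candies:
--             can = candy.replace(' ', '')  # Standardize candy name (remove spaces)
--             if can not in candy_dict:
--                 candy_dict[can] = [name]
--             else:
--                 candy_dict[can].append(name)
--     return candy_dict
-- ===== SOURCE B (Python) =====
-- def arrange_by_candies(fav_candies):
--     pairs = [(candy.replace(' ', ''), name)
--              for name, candies in fav_candies.items()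
--              for candy in candies]
--     keys = list(dict.fromkeys(k for k, _ in pairs))
--     pos = {k: i for i, k in enumerate(keys)}
--     buckets = [[] for _ in keys]
--     for k, n in pairs:
--         buckets[pos[k]].append(n)
--     return dict(zip(keys, buckets))
-- ===== Notes on version B (the rewrite author's own statement) =====
-- stated objective: alternative
-- what changed: B replaces A's single-pass insert-or-append dict mutation with a staged pipeline: flatten to (normalized_candy, name) pairs, ordered-dedup the candy keys, build a key->position map, distribute names into preallocated list buckets by position, and zip keys with buckets.
import Mathlib
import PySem

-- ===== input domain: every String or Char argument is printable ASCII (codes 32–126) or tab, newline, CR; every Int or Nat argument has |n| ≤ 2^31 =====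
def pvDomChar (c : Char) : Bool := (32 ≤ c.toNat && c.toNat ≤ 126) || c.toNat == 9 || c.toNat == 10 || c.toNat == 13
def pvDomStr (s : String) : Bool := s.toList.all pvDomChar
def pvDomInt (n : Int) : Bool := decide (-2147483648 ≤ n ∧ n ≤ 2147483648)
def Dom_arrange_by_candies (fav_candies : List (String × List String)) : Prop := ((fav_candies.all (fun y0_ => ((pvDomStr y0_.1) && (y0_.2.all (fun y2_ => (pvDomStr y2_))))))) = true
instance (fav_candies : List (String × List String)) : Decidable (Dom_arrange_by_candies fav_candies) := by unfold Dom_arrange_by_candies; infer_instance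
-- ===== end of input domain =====

-- B builds the inverted index by flatten → ordered-dedup of candy keys → position map → one
-- bucket-distribution pass over the pairs, instead of A's single-pass insert-or-append dict
-- mutation; objective: alternative decomposition.

-- ===== PORT A =====
def arrange_by_candies (fav_candies : List (String × List String)) : List (String × List String) :=
  (fav_candies.foldl
    (fun d nc =>
      nc.2.foldl
        (fun d candy =>
          let can := PySem.Str.replace candy " " ""
          if d.contains can = false then d.insert can [nc.1]
          else d.modify can [] (fun l => l ++ [nc.1]))
        d)
    PySem.Dict.empty).items

-- ===== PORT B =====
def arrange_by_candies_alt (fav_candies : List (String × List String)) : List (String × List String) :=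
  let pairs := fav_candies.flatMap
    (fun nc => nc.2.map (fun candy => (PySem.Str.replace candy " " "", nc.1)))
  let keys := PySem.List.dedup (pairs.map (fun p => p.1))
  let pos := PySem.Dict.ofList ((PySem.List.enumerate keys).map (fun e => (e.2, e.1)))
  let buckets := pairs.foldl
    (fun bs p =>
      let i := pos.getD p.1 0   -- pos[p.1]: the key is always present, so d[k] is this getD
      PySem.List.pySetD bs i (PySem.List.pyGetD bs i [] ++ [p.2]))
    (keys.map (fun _ => ([] : List String)))
  keys.zip buckets

-- ===== PRECONDITION & SPEC =====
-- The parameter is a Python dict, which cannot hold two equal keys; Pre_ restricts the association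
-- list to that shape (pairwise-distinct names) — no representable dict input is excluded.
def Pre_arrange_by_candies (fav_candies : List (String × List String)) : Prop :=
  (fav_candies.map (fun p => p.1)).Nodup
instance (fav_candies : List (String × List String)) : Decidable (Pre_arrange_by_candies fav_candies) := by unfold Pre_arrange_by_candies; infer_instance
def pvWitness_arrange_by_candies : (List (String × List String)) :=
  [("amy", ["kit kat", "snickers"]), ("bob", ["kitkat"])]
def Spec_arrange_by_candies (fav_candies : List (String × List String)) (out : List (String × List String)) : Prop := out = arrange_by_candies_alt fav_candies
instance (fav_candies : List (String × List String)) (out : List (String × List String)) : Decidable (Spec_arrange_by_candies fav_candies out) := by unfold Spec_arrange_by_candies; infer_instance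

-- ===== CLAIM (what is proved, stated in full; the proofs are below) =====
def Claim_equal_arrange_by_candies : Prop := ∀ (fav_candies : List (String × List String)), Dom_arrange_by_candies fav_candies → Pre_arrange_by_candies fav_candies → Spec_arrange_by_candies fav_candies (arrange_by_candies fav_candies)

-- ===== LEMMAS AND PROOFS =====

-- A's branch on membership is exactly one dict "modify" step.
theorem arrange_step_eq {κ : Type} [BEq κ] [LawfulBEq κ] (d : PySem.Dict κ (List String))
    (k : κ) (v : String) :
    (if d.contains k = false then d.insert k [v] else d.modify k [] (fun l => l ++ [v]))
      = d.modify k [] (fun l => l ++ [v]) := by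
  by_cases h : d.contains k = false
  · simp [h, PySem.Dict.modify, PySem.Dict.getD_of_not_contains d [] h]
  · simp [h]

-- A's nested loop is the grouping fold over the flattened (candy, name) pair list.
theorem arrange_foldl_eq (fav_candies : List (String × List String)) :
    fav_candies.foldl
      (fun d nc =>
        nc.2.foldl
          (fun d candy =>
            let can := PySem.Str.replace candy " " ""
            if d.contains can = false then d.insert can [nc.1]
            else d.modify can [] (fun l => l ++ [nc.1]))
          d)
      PySem.Dict.empty
    = (fav_candies.flatMap
        (fun nc => nc.2.map (fun candy => (PySem.Str.replace candy " " "", nc.1)))).foldl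
        (fun d p => d.modify p.1 [] (fun l => l ++ [p.2])) PySem.Dict.empty := by
  rw [List.foldl_flatMap]
  refine PySem.List.foldl_congr_mem _ _ _ _ (fun d nc _ => ?_)
  rw [List.foldl_map]
  exact PySem.List.foldl_congr_mem _ _ _ _
    (fun d candy _ => arrange_step_eq d (PySem.Str.replace candy " " "") nc.1)

-- membership in an enumeration, at the key's first index
theorem mem_enumerate_idxOf (keys : List String) (k : String) (s : Int) (hk : k ∈ keys) :
    (s + (keys.idxOf k : Int), k) ∈ PySem.List.enumerate keys s := by
  induction keys generalizing s with
  | nil => cases hk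
  | cons x xs ih =>
    rw [PySem.List.enumerate_cons]
    by_cases hx : x = k
    · subst hx; simp
    · have hk' : k ∈ xs := by cases hk with
        | head => exact absurd rfl hx
        | tail _ h => exact h
      have h2 := ih (s + 1) hk'
      have hix : List.idxOf k (x :: xs) = List.idxOf k xs + 1 := by
        simp [List.idxOf_cons, beq_eq_false_iff_ne.mpr hx]
      rw [hix]
      right
      rw [show s + ((List.idxOf k xs + 1 : Nat) : Int) = s + 1 + (List.idxOf k xs : Int) by
        push_cast; ring]
      exact h2

-- the position dictionary returns the key's first index in `keys`
theorem pos_getD (keys : List String) (hn : keys.Nodup) (k : String) (hk : k ∈ keys) :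
    (PySem.Dict.ofList ((PySem.List.enumerate keys).map (fun e => (e.2, e.1)))).getD k 0
      = (keys.idxOf k : Int) := by
  have hitems : (PySem.Dict.ofList
      ((PySem.List.enumerate keys).map (fun e => (e.2, e.1)))).items
      = (PySem.List.enumerate keys).map (fun e => (e.2, e.1)) := by
    have := PySem.Dict.items_foldl_insert_fresh
      ((PySem.List.enumerate keys).map (fun e => (e.2, e.1)))
      (fun p => p.1) (fun p => p.2) PySem.Dict.empty
      (fun a _ => by simp)
      (by rw [List.map_map]
          simpa [Function.comp_def, PySem.List.map_snd_enumerate] using hn)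
    simpa [PySem.Dict.ofList, PySem.Dict.update] using this
  have hmem : (k, (keys.idxOf k : Int)) ∈ (PySem.Dict.ofList
      ((PySem.List.enumerate keys).map (fun e => (e.2, e.1)))).items := by
    rw [hitems]
    exact List.mem_map.mpr ⟨((keys.idxOf k : Int), k), by
      simpa using mem_enumerate_idxOf keys k 0 hk, rfl⟩
  refine PySem.Dict.getD_of_mem_items _ hmem ?_ 0
  simp only [PySem.Dict.keys, hitems, List.map_map]
  simpa [Function.comp_def, PySem.List.map_snd_enumerate] using hn
-- updating a keyed bucket table at a key's first index, when keys are distinct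
theorem set_map_idxOf (keys : List String) (hn : keys.Nodup) (k : String) (hk : k ∈ keys)
    (B : String → List String) (v : List String) :
    (keys.map B).set (keys.idxOf k) v
      = keys.map (fun k' => if k' = k then v else B k') := by
  induction keys with
  | nil => rfl
  | cons x xs ih =>
    by_cases hx : x = k
    · subst hx
      simp only [List.idxOf_cons, beq_self_eq_true, cond_true, List.map_cons, List.set_cons_zero]
      have : ∀ k' ∈ xs, (if k' = x then v else B k') = B k' := by
        intro k' hk'
        have : k' ≠ x := fun h => (List.nodup_cons.mp hn).1 (h ▸ hk')
        simp [this]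
      rw [List.map_congr_left this]
      simp
    · have hk' : k ∈ xs := by cases hk with
        | head => exact absurd rfl hx
        | tail _ h => exact h
      have hbeq : (x == k) = false := beq_eq_false_iff_ne.mpr hx
      simp only [List.idxOf_cons, hbeq, cond_false, List.map_cons, List.set_cons_succ]
      rw [ih (List.nodup_cons.mp hn).2 hk']
      simp [hx]

-- the bucket-distribution loop computes, per key, the names of that key's pairs
theorem buckets_eq (keys : List String) (hn : keys.Nodup)
    (qs : List (String × String)) (B : String → List String)
    (hq : ∀ p ∈ qs, p.1 ∈ keys) :
    qs.foldl
      (fun bs p =>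
        let i := (PySem.Dict.ofList
          ((PySem.List.enumerate keys).map (fun e => (e.2, e.1)))).getD p.1 0
        PySem.List.pySetD bs i (PySem.List.pyGetD bs i [] ++ [p.2]))
      (keys.map B)
    = keys.map (fun k => B k ++ (qs.filter (fun p => p.1 == k)).map (fun p => p.2)) := by
  induction qs generalizing B with
  | nil => simp
  | cons p qs ih =>
    have hp : p.1 ∈ keys := hq p (List.mem_cons_self)
    have hidx : keys.idxOf p.1 < keys.length := List.idxOf_lt_length_of_mem hp
    rw [List.foldl_cons]
    have hstep :
        (PySem.List.pySetD (keys.map B)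
          ((PySem.Dict.ofList ((PySem.List.enumerate keys).map (fun e => (e.2, e.1)))).getD p.1 0)
          (PySem.List.pyGetD (keys.map B)
            ((PySem.Dict.ofList ((PySem.List.enumerate keys).map (fun e => (e.2, e.1)))).getD p.1 0)
            [] ++ [p.2]))
        = keys.map (fun k' => if k' = p.1 then B p.1 ++ [p.2] else B k') := by
      rw [pos_getD keys hn p.1 hp]
      rw [PySem.List.pyGetD_eq_getElem _ _ (by positivity) (by simpa using hidx)]
      rw [PySem.List.pySetD_of_nonneg _ _ (by positivity)]
      simp only [Int.toNat_natCast]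
      rw [List.getElem_map, List.getElem_idxOf hidx]
      exact set_map_idxOf keys hn p.1 hp B _
    rw [hstep, ih _ (fun p hp' => hq p (List.mem_cons_of_mem _ hp'))]
    refine List.map_congr_left (fun k hk => ?_)
    by_cases hkp : p.1 = k
    · subst hkp
      simp
    · have : (p.1 == k) = false := beq_eq_false_iff_ne.mpr hkp
      simp [this, Ne.symm hkp]

theorem zip_self_map {α β : Type} (l : List α) (f : α → β) :
    l.zip (l.map f) = l.map (fun a => (a, f a)) := by
  induction l with
  | nil => rfl
  | cons x xs ih => simp [ih]

-- ===== VERDICT (by name: the statement is the Claim_ definition above) =====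
theorem arrange_by_candies_spec : Claim_equal_arrange_by_candies := by
  intro fav _ _
  unfold Spec_arrange_by_candies arrange_by_candies arrange_by_candies_alt
  rw [arrange_foldl_eq]
  set pairs := fav.flatMap
    (fun nc => nc.2.map (fun candy => (PySem.Str.replace candy " " "", nc.1))) with hp
  set keys := PySem.List.dedup (pairs.map (fun p => p.1)) with hkeys
  have hn : keys.Nodup := PySem.List.nodup_dedup _
  have hnd : ((pairs.foldl (fun d p => d.modify p.1 [] (fun l => l ++ [p.2]))
      PySem.Dict.empty).keys).Nodup :=
    PySem.Dict.nodup_keys_foldl_modify_key pairs (fun p => p.1) []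
      (fun _ p l => l ++ [p.2]) PySem.Dict.empty (by simp)
  rw [PySem.Dict.items_eq_map_keys _ hnd []]
  rw [PySem.Dict.keys_foldl_modify_key pairs (fun p => p.1) [] (fun _ p l => l ++ [p.2])]
  have hkeys' : PySem.Set.update (PySem.Dict.empty (κ := String) (ν := List String)).keys
      (pairs.map (fun p => p.1)) = keys := by
    simp [hkeys, PySem.Set.update, PySem.List.dedup_eq_ofList, PySem.Set.ofList]
  rw [hkeys']
  show _ = keys.zip (pairs.foldl
    (fun bs p =>
      let i := (PySem.Dict.ofList
        ((PySem.List.enumerate keys).map (fun e => (e.2, e.1)))).getD p.1 0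
      PySem.List.pySetD bs i (PySem.List.pyGetD bs i [] ++ [p.2]))
    (keys.map (fun _ => ([] : List String))))
  rw [buckets_eq keys hn pairs (fun _ => []) (fun p hp' =>
    (PySem.List.mem_dedup _ _).mpr (List.mem_map.mpr ⟨p, hp', rfl⟩))]
  rw [zip_self_map]
  refine List.map_congr_left (fun k _ => ?_)
  rw [PySem.Dict.getD_foldl_modify_append, PySem.Dict.getD_empty]
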